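-- pv_equiv track=rewrite | github.com/MRFLucifer/HashCrack | HashCrack.py | MainColor2
-- ===== SOURCE A (Python) =====
-- def MainColor2(text):
--     start_color = (0, 255, 255)
--     end_color = (200, 255, 255)
--
--     num_steps = 9
--
--     colors = []
--     for i in range(num_steps):
--         r = start_color[0] + (end_color[0] - start_color[0]) * i // (num_steps - 1)
--         g = start_color[1] + (end_color[1] - start_color[1]) * i // (num_steps - 1)
--         b = start_color[2] + (end_color[2] - start_color[2]) * i // (num_steps - 1)
--         colors.append((r, g, b))
--
--     colors += list(reversed(colors[:-1]))
--
--     def text_color(r, g, b):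
--         return f"\033[38;2;{r};{g};{b}m"
--
--     lines = text.split('\n')
--     num_colors = len(colors)
--
--     result = []
--     for i, line in enumerate(lines):
--         for j, char in enumerate(line):
--             color_index = (i + j) % num_colors
--             color = colors[color_index]
--             result.append(text_color(*color) + char + "\033[0m")
--
--         if i < len(lines) - 1:
--             result.append('\n')
--
--     return ''.join(result)
-- ===== SOURCE B (Python) =====
-- def MainColor2(text):
--     # Rotating-palette algorithm: precompute the 17 ANSI prefix strings once;
--     # for each line, zip its characters against the current rotation of the
--     # palette repeated enough times (no per-character index arithmetic), then
--     # rotate the palette left by one for the next line; join lines with '\n'.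
--     palette = ['\033[38;2;%d;255;255m' % (25 * min(k, 16 - k)) for k in range(17)]
--     colored = []
--     rot = palette
--     for line in text.split('\n'):
--         reps = rot * (len(line) // 17 + 1)
--         colored.append(''.join(p + c + '\033[0m' for p, c in zip(reps, line)))
--         rot = rot[1:] + rot[:1]
--     return '\n'.join(colored)
-- ===== Notes on version B (the rewrite author's own statement) =====
-- stated objective: alternative
-- what changed: B replaces A's per-character work (nested enumerate loops computing (i+j)%17 and formatting a fresh escape string for every character) by a rotating-palette algorithm: the 17 ANSI prefix strings are precomputed once, each line is zipped against the current rotation of the palette repeated enough times (no index arithmetic and no string formatting per character), the palette is rotated left by one between lines, and the colored lines are joined with newlines.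
import Mathlib
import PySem

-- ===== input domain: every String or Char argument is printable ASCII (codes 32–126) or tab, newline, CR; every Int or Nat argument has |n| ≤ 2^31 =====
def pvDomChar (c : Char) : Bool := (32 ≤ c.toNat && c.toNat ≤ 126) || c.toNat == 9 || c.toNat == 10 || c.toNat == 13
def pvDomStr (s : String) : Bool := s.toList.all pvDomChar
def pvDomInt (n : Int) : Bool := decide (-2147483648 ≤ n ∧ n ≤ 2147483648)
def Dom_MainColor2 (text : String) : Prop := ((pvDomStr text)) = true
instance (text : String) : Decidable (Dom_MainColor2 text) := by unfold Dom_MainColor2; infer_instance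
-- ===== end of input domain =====

-- B replaces A's per-character modular palette indexing by a rotating-palette algorithm:
-- the 17 ANSI prefixes are precomputed once, each ln is zipped against the current
-- rotation of the palette repeated enough times, and the palette is rotated left by one
-- between lines; lines are joined with '\n' (objective: alternative algorithm, same cost).

-- ===== PORT A =====
-- strings are handled as List Char (PySem.Chars level) throughout; the final ''.join is PySem.Chars.join
def pvTextColorA (r g b : Int) : List Char :=
  "\x1b[38;2;".toList ++ PySem.Int.toChars r ++ [';'] ++ PySem.Int.toChars g ++ [';'] ++ PySem.Int.toChars b ++ ['m']

def pvColorsA : List (Int × Int × Int) :=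
  let colors : List (Int × Int × Int) :=
    (PySem.List.pyRange 0 9 1).foldl (fun cs i =>
      cs ++ [(0 + PySem.Int.floordiv ((200 - 0) * i) (9 - 1),
              255 + PySem.Int.floordiv ((255 - 255) * i) (9 - 1),
              255 + PySem.Int.floordiv ((255 - 255) * i) (9 - 1))]) []
  colors ++ (PySem.List.slice colors none (some (-1))).reverse

def pvStepInnerA (numColors : Int) (i : Int) (res2 : List (List Char)) (q : Int × Char) : List (List Char) :=
  let color := (PySem.List.pyGet? pvColorsA (PySem.Int.mod (i + q.1) numColors)).getD (0, 0, 0)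
  res2 ++ [pvTextColorA color.1 color.2.1 color.2.2 ++ [q.2] ++ "\x1b[0m".toList]

def MainColor2 (text : String) : String :=
  let lines := PySem.Chars.splitOn text.toList ['\n']
  let numColors : Int := (pvColorsA.length : Int)
  let result : List (List Char) :=
    (PySem.List.enumerate lines 0).foldl (fun res p =>
      if p.1 < (lines.length : Int) - 1 then
        (PySem.List.enumerate p.2 0).foldl (pvStepInnerA numColors p.1) res ++ [['\n']]
      else
        (PySem.List.enumerate p.2 0).foldl (pvStepInnerA numColors p.1) res) []
  String.ofList (PySem.Chars.join [] result)

-- ===== PORT B =====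
def pvReset : List Char := "\x1b[0m".toList

-- palette = ['\033[38;2;%d;255;255m' % (25 * min(k, 16 - k)) for k in range(17)]
def pvPalette : List (List Char) :=
  (PySem.List.pyRange 0 17 1).map (fun k =>
    "\x1b[38;2;".toList ++ PySem.Int.toChars (25 * min k (16 - k)) ++ ";255;255m".toList)

-- reps = rot * (len(ln) // 17 + 1); ''.join(p + c + RESET for p, c in zip(reps, ln))
def pvColorLineB (rot : List (List Char)) (ln : List Char) : List Char :=
  PySem.Chars.join []
    (((List.replicate (ln.length / 17 + 1) rot).flatten.zip ln).map
      (fun pc => pc.1 ++ [pc.2] ++ pvReset))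

-- rot = rot[1:] + rot[:1]  (nonnegative in-range slices, exactly drop/take)
def MainColor2_alt (text : String) : String :=
  let st := (PySem.Chars.splitOn text.toList ['\n']).foldl
    (fun (st : List (List Char) × List (List Char)) ln =>
      (st.1 ++ [pvColorLineB st.2 ln], st.2.drop 1 ++ st.2.take 1)) ([], pvPalette)
  String.ofList (PySem.Chars.join ['\n'] st.1)

-- ===== PRECONDITION & SPEC =====
def Spec_MainColor2 (text : String) (out : String) : Prop := out = MainColor2_alt text
instance (text : String) (out : String) : Decidable (Spec_MainColor2 text out) := by unfold Spec_MainColor2; infer_instance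

-- ===== CLAIM =====
def Claim_equal_MainColor2 : Prop := ∀ (text : String), Dom_MainColor2 text → Spec_MainColor2 text (MainColor2 text)

-- ===== LEMMAS AND PROOFS =====
def sp : List Char → List Char → List (List Char)
  | cur, [] => [cur.reverse]
  | cur, c :: cs => if c = '\n' then cur.reverse :: sp [] cs else sp (c :: cur) cs

theorem sp_ne_nil (cur l : List Char) : sp cur l ≠ [] := by
  induction l generalizing cur with
  | nil => simp [sp]
  | cons c cs ih =>
    by_cases h : c = '\n'
    · simp [sp, h]
    · simp [sp, h]; exact ih _

theorem go_eq (l : List Char) (fuel : Nat) (cur : List Char) (acc : List (List Char))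
    (h : l.length < fuel) :
    PySem.Chars.splitOn.go ['\n'] fuel l cur acc = acc.reverse ++ sp cur l := by
  induction l generalizing fuel cur acc with
  | nil =>
    cases fuel with
    | zero => omega
    | succ f => simp [PySem.Chars.splitOn.go, sp]
  | cons c cs ih =>
    cases fuel with
    | zero => omega
    | succ f =>
      by_cases hc : c = '\n'
      · subst hc
        rw [PySem.Chars.splitOn.go]
        have hp : List.isPrefixOf ['\n'] ('\n' :: cs) = true := by simp [List.isPrefixOf]
        rw [if_pos hp]
        simp only [List.length_singleton, List.drop_succ_cons, List.drop_zero]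
        simp only [List.length_cons] at h
        rw [ih f [] (cur.reverse :: acc) (by omega)]
        simp [sp]
      · rw [PySem.Chars.splitOn.go]
        have hp : List.isPrefixOf ['\n'] (c :: cs) = false := by simp [List.isPrefixOf, Ne.symm hc]
        rw [if_neg (by simp [hp])]
        simp only [List.length_cons] at h
        rw [ih f (c :: cur) acc (by omega)]
        simp [sp, hc]

theorem splitOn_eq (cs : List Char) : PySem.Chars.splitOn cs ['\n'] = sp [] cs := by
  have := go_eq cs (cs.length + 1) [] [] (by omega)
  simpa [PySem.Chars.splitOn] using this

-- token spec shared by both proofs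
def tokB (n : Nat) (c : Char) : List Char := pvPalette.getD (n % 17) [] ++ [c] ++ pvReset

def lineToks : Nat → List Char → List (List Char)
  | _, [] => []
  | n, c :: cs => tokB n c :: lineToks (n + 1) cs

def linesOut : Nat → List (List Char) → List (List Char)
  | _, [] => []
  | o, l :: ls => PySem.Chars.join [] (lineToks o l) :: linesOut (o + 1) ls

-- A-side chunks
def chunkA (n : Int) (c : Char) : List (List Char) := pvStepInnerA 17 0 [] (n, c)

def Crec (i : Int) : Int → List Char → List (List Char)
  | _, [] => []
  | j, c :: cs => chunkA (i + j) c ++ Crec i (j + 1) cs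

def AprocJ : Int → Int → List (List Char) → List (List Char)
  | _, _, [] => []
  | i, j, [l] => Crec i j l
  | i, j, l :: l' :: ls => Crec i j l ++ ['\n'] :: AprocJ (i + 1) 0 (l' :: ls)

theorem chunk_eq (n : Nat) (c : Char) : chunkA (n : Int) c = [tokB n c] := by
  have H : ∀ k : Fin 17,
      pvTextColorA ((PySem.List.pyGet? pvColorsA ((k.val : Nat) : Int)).getD (0,0,0)).1
        ((PySem.List.pyGet? pvColorsA ((k.val : Nat) : Int)).getD (0,0,0)).2.1
        ((PySem.List.pyGet? pvColorsA ((k.val : Nat) : Int)).getD (0,0,0)).2.2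
      = pvPalette.getD k.val [] := by decide
  have hm : PySem.Int.mod (n : Int) 17 = ((n % 17 : Nat) : Int) := by
    rw [PySem.Int.mod_eq_emod_of_pos (by decide : (0:Int) < 17)]
    omega
  have hk : n % 17 < 17 := Nat.mod_lt _ (by decide)
  simp only [chunkA, tokB, pvStepInnerA, Int.zero_add, List.nil_append, hm]
  rw [H ⟨n % 17, hk⟩]
  simp [pvReset]

theorem chunk_eq' (n : Int) (c : Char) (h : 0 ≤ n) : chunkA n c = [tokB n.toNat c] := by
  obtain ⟨m, rfl⟩ := Int.eq_ofNat_of_zero_le h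
  simpa using chunk_eq m c

theorem Crec_eq (ln : List Char) (i j : Int) (hi : 0 ≤ i) (hj : 0 ≤ j) :
    Crec i j ln = lineToks (i + j).toNat ln := by
  induction ln generalizing j with
  | nil => simp [Crec, lineToks]
  | cons c cs ih =>
    have h2 : (i + (j + 1)).toNat = (i + j).toNat + 1 := by omega
    rw [Crec, chunk_eq' _ c (by omega), ih (j + 1) (by omega), h2]
    rfl

theorem inner_fold (i : Int) (cs : List Char) (j : Int) (res : List (List Char)) :
    (PySem.List.enumerate cs j).foldl (pvStepInnerA 17 i) res = res ++ Crec i j cs := by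
  induction cs generalizing j res with
  | nil => simp [PySem.List.enumerate_nil, Crec]
  | cons c cs ih =>
    rw [PySem.List.enumerate_cons]
    simp only [List.foldl_cons]
    have hstep : pvStepInnerA 17 i res (j, c) = res ++ chunkA (i + j) c := by
      simp [pvStepInnerA, chunkA]
    rw [hstep, ih (j + 1)]
    simp [Crec, List.append_assoc]

theorem outer_fold (L : Nat) (ls : List (List Char)) (s : Int) (res : List (List Char))
    (hs : 0 ≤ s) (h : s + ls.length = (L : Int)) :
    (PySem.List.enumerate ls s).foldl (fun res p =>
      if p.1 < (L : Int) - 1 then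
        (PySem.List.enumerate p.2 0).foldl (pvStepInnerA 17 p.1) res ++ [['\n']]
      else
        (PySem.List.enumerate p.2 0).foldl (pvStepInnerA 17 p.1) res) res
      = res ++ AprocJ s 0 ls := by
  induction ls generalizing s res with
  | nil => simp [PySem.List.enumerate_nil, AprocJ]
  | cons l ls ih =>
    rw [PySem.List.enumerate_cons]
    simp only [List.foldl_cons]
    rw [inner_fold]
    cases ls with
    | nil =>
      have hno : ¬ (s < (L : Int) - 1) := by
        simp only [List.length_cons, List.length_nil] at h; omega
      rw [if_neg hno]
      simp [PySem.List.enumerate_nil, AprocJ]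
    | cons l2 ls2 =>
      have hyes : s < (L : Int) - 1 := by
        simp only [List.length_cons] at h; omega
      rw [if_pos hyes]
      rw [ih (s + 1) _ (by omega) (by simp only [List.length_cons] at h ⊢; push_cast at h ⊢; omega)]
      simp [AprocJ, List.append_assoc]

-- ===== B-side lemmas =====
theorem palette_length : pvPalette.length = 17 := by decide

theorem join_nil_flatten (l : List (List Char)) : PySem.Chars.join [] l = l.flatten := by
  induction l with
  | nil => rfl
  | cons a l ih =>
    cases l with
    | nil => simp [PySem.Chars.join_singleton]
    | cons b l => rw [PySem.Chars.join_cons_cons, ih]; simp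

theorem flatten_replicate_get? {α : Type} (r : List α) (m k : Nat) (hk : k < r.length * m) :
    ((List.replicate m r).flatten)[k]? = r[k % r.length]? := by
  induction m generalizing k with
  | zero => simp at hk
  | succ m ih =>
    have hms : r.length * (m + 1) = r.length * m + r.length := by ring
    rw [List.replicate_succ, List.flatten_cons]
    by_cases h : k < r.length
    · rw [List.getElem?_append_left h, Nat.mod_eq_of_lt h]
    · have h' : r.length ≤ k := Nat.le_of_not_lt h
      rw [List.getElem?_append_right h']
      rw [ih (k - r.length) (by omega), Nat.mod_eq_sub_mod h']

theorem lineToks_length (ln : List Char) (n : Nat) : (lineToks n ln).length = ln.length := by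
  induction ln generalizing n with
  | nil => simp [lineToks]
  | cons c cs ih => simp [lineToks, ih]

theorem lineToks_get (ln : List Char) (n k : Nat) (hk : k < ln.length)
    (h2 : k < (lineToks n ln).length) :
    (lineToks n ln)[k]'h2 = tokB (n + k) (ln[k]'hk) := by
  induction ln generalizing n k with
  | nil => simp at hk
  | cons c cs ih =>
    cases k with
    | zero => simp [lineToks]
    | succ k =>
      have hk' : k < cs.length := by simpa using hk
      have h2' : k < (lineToks (n + 1) cs).length := by rw [lineToks_length]; exact hk'
      have := ih (n + 1) k hk' h2'
      simp only [lineToks, List.getElem_cons_succ]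
      rw [this]
      congr 1
      omega

theorem colorLine_eq (o : Nat) (ln : List Char) :
    pvColorLineB (pvPalette.rotate o) ln = PySem.Chars.join [] (lineToks o ln) := by
  unfold pvColorLineB
  congr 1
  have hrl : (pvPalette.rotate o).length = 17 := by rw [List.length_rotate, palette_length]
  have hL : ln.length < 17 * (ln.length / 17 + 1) := by
    have h1 := Nat.div_add_mod ln.length 17
    have h2 : ln.length % 17 < 17 := Nat.mod_lt _ (by decide)
    omega
  have hflen : ((List.replicate (ln.length / 17 + 1) (pvPalette.rotate o)).flatten).length
      = 17 * (ln.length / 17 + 1) := by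
    rw [List.length_flatten, List.map_replicate, hrl, List.sum_replicate, smul_eq_mul]
    ring
  apply List.ext_getElem
  · simp [List.length_zip, hflen, lineToks_length]
    omega
  · intro k h1 h2
    have hkL : k < ln.length := by
      simp only [lineToks_length] at h2; exact h2
    rw [List.getElem_map, List.getElem_zip]
    rw [lineToks_get ln o k hkL h2]
    have h17' : k < ((List.replicate (ln.length / 17 + 1) (pvPalette.rotate o)).flatten).length := by
      rw [hflen]; omega
    have hm' : k % 17 < (pvPalette.rotate o).length := by
      rw [hrl]; exact Nat.mod_lt _ (by decide)
    have hsom := flatten_replicate_get? (pvPalette.rotate o) (ln.length / 17 + 1) k (by rw [hrl]; omega)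
    rw [hrl] at hsom
    rw [List.getElem?_eq_getElem h17', List.getElem?_eq_getElem hm'] at hsom
    have hrep := Option.some.inj hsom
    rw [hrep, List.getElem_rotate]
    unfold tokB
    have hmod : (k % 17 + o) % pvPalette.length = (o + k) % 17 := by
      rw [palette_length]
      omega
    have hm17 : (o + k) % 17 < pvPalette.length := by
      rw [palette_length]; exact Nat.mod_lt _ (by decide)
    have hpal : pvPalette[(k % 17 + o) % pvPalette.length]'(Nat.mod_lt _ (by rw [palette_length]; decide))
        = pvPalette.getD ((o + k) % 17) [] := by
      rw [List.getD_eq_getElem pvPalette [] hm17]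
      exact getElem_congr_idx hmod
    simp only [hpal]

theorem rot_step (o : Nat) :
    (pvPalette.rotate o).drop 1 ++ (pvPalette.rotate o).take 1 = pvPalette.rotate (o + 1) := by
  have h1 : (1 : Nat) ≤ (pvPalette.rotate o).length := by rw [List.length_rotate, palette_length]; omega
  rw [← List.rotate_eq_drop_append_take h1, List.rotate_rotate]

theorem b_fold (ls : List (List Char)) (o : Nat) (acc : List (List Char)) :
    (ls.foldl (fun (st : List (List Char) × List (List Char)) ln =>
      (st.1 ++ [pvColorLineB st.2 ln], st.2.drop 1 ++ st.2.take 1)) (acc, pvPalette.rotate o)).1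
    = acc ++ linesOut o ls := by
  induction ls generalizing o acc with
  | nil => simp [linesOut]
  | cons l ls ih =>
    simp only [List.foldl_cons]
    rw [colorLine_eq, rot_step, ih]
    simp [linesOut, List.append_assoc]

theorem glue (ls : List (List Char)) (o : Nat) (h : ls ≠ []) :
    PySem.Chars.join [] (AprocJ (o : Int) 0 ls) = PySem.Chars.join ['\n'] (linesOut o ls) := by
  induction ls generalizing o with
  | nil => exact absurd rfl h
  | cons l ls ih =>
    have ho : ((o : Int) + 0).toNat = o := by omega
    cases ls with
    | nil =>
      show PySem.Chars.join [] (Crec (o : Int) 0 l) = _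
      rw [Crec_eq l (o : Int) 0 (by omega) (by omega), ho]
      show _ = PySem.Chars.join ['\n'] [PySem.Chars.join [] (lineToks o l)]
      rw [PySem.Chars.join_singleton]
    | cons l2 ls2 =>
      show PySem.Chars.join [] (Crec (o : Int) 0 l ++ ['\n'] :: AprocJ ((o : Int) + 1) 0 (l2 :: ls2)) = _
      have hcast : (o : Int) + 1 = ((o + 1 : Nat) : Int) := by push_cast; ring
      rw [Crec_eq l (o : Int) 0 (by omega) (by omega), ho, hcast]
      rw [join_nil_flatten, List.flatten_append, List.flatten_cons,
          ← join_nil_flatten (AprocJ ((o + 1 : Nat) : Int) 0 (l2 :: ls2)),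
          ← join_nil_flatten (lineToks o l), ih (o + 1) (by simp)]
      show _ = PySem.Chars.join ['\n'] (PySem.Chars.join [] (lineToks o l) :: linesOut (o + 1) (l2 :: ls2))
      have hlo : linesOut (o + 1) (l2 :: ls2)
          = PySem.Chars.join [] (lineToks (o + 1) l2) :: linesOut (o + 1 + 1) ls2 := rfl
      rw [hlo, PySem.Chars.join_cons_cons, ← hlo]
      simp [List.append_assoc]

theorem MainColor2_eq (text : String) : MainColor2 text = MainColor2_alt text := by
  unfold MainColor2 MainColor2_alt
  have h17 : (pvColorsA.length : Int) = 17 := by decide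
  simp only [h17, splitOn_eq]
  rw [outer_fold (sp [] text.toList).length (sp [] text.toList) 0 [] (by omega) (by omega)]
  have h0 : pvPalette = pvPalette.rotate 0 := (List.rotate_zero pvPalette).symm
  rw [h0, b_fold (sp [] text.toList) 0 []]
  have hg := glue (sp [] text.toList) 0 (sp_ne_nil [] text.toList)
  norm_num at hg
  simp only [List.nil_append]
  rw [hg]

-- ===== VERDICT =====
theorem MainColor2_spec : Claim_equal_MainColor2 := by
  intro text _
  unfold Spec_MainColor2
  exact MainColor2_eq text
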